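-- pv_equiv track=rewrite | github.com/ZhangJJ26/COMPASS-PTM | models/dataset.py | preprocess_sequence
-- ===== SOURCE A (Python) =====
-- def preprocess_sequence(sequence, window_size=50):
--     pep_seq_list = []
--     sequence = sequence.upper()
--     i = 0
--     while i < len(sequence):
--         if i + window_size <= len(sequence):
--             pep_seq = sequence[i:i + window_size]
--         else:
--             pep_seq = sequence[i:]
--             padding = window_size - len(pep_seq)
--             pep_seq = sequence[i:] + 'X' * padding
--
--         start = max(0, i - 10)
--         end = min(len(sequence), i + window_size + 10)
--         pep_seq_extend = sequence[start:end]
--         if start == 0: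
--             pep_seq_extend = 'X' * (10 - i) + pep_seq_extend
--         if end == len(sequence):
--             pep_seq_extend = pep_seq_extend + 'X' * (10 - (len(sequence) - i - window_size))
--
--         pep_seq_list.append(pep_seq_extend)
--         i += window_size
--     return pep_seq_list
-- ===== SOURCE B (Python) =====
-- def preprocess_sequence(sequence, window_size=50):
--     s = sequence.upper()
--     windows = []
--     if s:
--         padding = 'X' * (window_size + 10)
--         padded = 'X' * 10 + s + padding
--         for i in range(0, len(s), window_size):
--             windows.append(padded[i:i + window_size + 20])
--     return windows
-- ===== Notes on version B (the rewrite author's own statement) =====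
-- stated objective: simpler
-- what changed: B pads the upper-cased sequence once on both sides (10 pad chars on the left, window_size+10 on the right) and emits one fixed-width slice per window over range(0, len, window_size), eliminating A's dead pep_seq computation and all four boundary branches.
import Mathlib
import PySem

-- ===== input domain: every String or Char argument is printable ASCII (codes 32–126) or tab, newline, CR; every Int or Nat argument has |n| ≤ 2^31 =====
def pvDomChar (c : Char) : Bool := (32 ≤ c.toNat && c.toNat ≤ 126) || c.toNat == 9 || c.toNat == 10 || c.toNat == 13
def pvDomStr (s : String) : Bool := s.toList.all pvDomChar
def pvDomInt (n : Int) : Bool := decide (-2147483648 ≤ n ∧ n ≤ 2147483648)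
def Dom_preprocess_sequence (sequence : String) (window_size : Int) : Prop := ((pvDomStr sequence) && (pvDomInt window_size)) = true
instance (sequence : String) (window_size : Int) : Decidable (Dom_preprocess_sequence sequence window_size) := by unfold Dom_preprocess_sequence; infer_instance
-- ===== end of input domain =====

-- B pads the sequence once on both sides and takes one fixed-width slice per window, removing A's boundary branches and dead pep_seq; simpler, equal return values on Pre_.

-- ===== PORT A =====
-- the extended-window computation of A's loop body (start/end clamping and the two conditional pads)
def pvExtA (s : List Char) (w i : Int) : List Char :=
  let start := max 0 (i - 10)
  let end_ := min ((s.length : Int)) (i + w + 10)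
  let ext0 := PySem.List.slice s (some start) (some end_)
  let ext1 := if start = 0 then List.replicate (10 - i).toNat 'X' ++ ext0 else ext0
  if end_ = (s.length : Int) then ext1 ++ List.replicate (10 - ((s.length : Int) - i - w)).toNat 'X' else ext1

-- A's while loop (fuel bounds the number of iterations; with window_size ≥ 1 it never runs out)
def pvLoopA (s : List Char) (w : Int) (fuel : Nat) (i : Int) (acc : List String) : List String :=
  match fuel with
  | 0 => acc
  | Nat.succ fuel =>
    if i < (s.length : Int) then
      -- pep_seq is computed by A but never used (dead variable); kept for faithfulness
      let _pep_seq :=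
        if i + w ≤ (s.length : Int) then PySem.List.slice s (some i) (some (i + w))
        else
          let p := PySem.List.slice s (some i) none
          PySem.List.slice s (some i) none ++ List.replicate (w - (p.length : Int)).toNat 'X'
      pvLoopA s w fuel (i + w) (acc ++ [String.ofList (pvExtA s w i)])
    else acc

def preprocess_sequence (sequence : String) (window_size : Int) : List String :=
  let s := PySem.Chars.upper sequence.toList
  pvLoopA s window_size (s.length + 1) 0 []

-- ===== PORT B =====
def preprocess_sequence_alt (sequence : String) (window_size : Int) : List String :=
  let s := PySem.Chars.upper sequence.toList
  if s = [] then [] else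
    let padding := List.replicate (window_size + 10).toNat 'X'
    let padded := List.replicate 10 'X' ++ s ++ padding
    (PySem.List.pyRange 0 (s.length : Int) window_size).foldl
      (fun windows i =>
        windows ++ [String.ofList (PySem.List.slice padded (some i) (some (i + window_size + 20)))]) []

-- ===== PRECONDITION & SPEC =====
-- Pre_ excludes nonpositive window_size on a nonempty sequence, where A's while loop never terminates.
def Pre_preprocess_sequence (sequence : String) (window_size : Int) : Prop :=
  sequence = "" ∨ 1 ≤ window_size
instance (sequence : String) (window_size : Int) : Decidable (Pre_preprocess_sequence sequence window_size) := by unfold Pre_preprocess_sequence; infer_instance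

def pvWitness_preprocess_sequence : String × Int := ("MkvAE", 2)

def Spec_preprocess_sequence (sequence : String) (window_size : Int) (out : List String) : Prop := out = preprocess_sequence_alt sequence window_size
instance (sequence : String) (window_size : Int) (out : List String) : Decidable (Spec_preprocess_sequence sequence window_size out) := by unfold Spec_preprocess_sequence; infer_instance

-- ===== CLAIM (what is proved, stated in full; the proofs are below) =====
def Claim_equal_preprocess_sequence : Prop := ∀ (sequence : String) (window_size : Int), Dom_preprocess_sequence sequence window_size → Pre_preprocess_sequence sequence window_size → Spec_preprocess_sequence sequence window_size (preprocess_sequence sequence window_size)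

-- ===== LEMMAS AND PROOFS =====


-- pure-list window identities (one per boundary case of A), used by pvExtA_eq_slice
theorem pvCase1 (l : List Char) (m W : Nat) (hW : 1 ≤ W) (hm : m < l.length)
    (h1 : m ≤ 10) (h2 : l.length ≤ m + W + 10) :
    List.replicate (10 - m) 'X' ++ l.take l.length ++ List.replicate (m + W + 10 - l.length) 'X' =
      ((List.replicate 10 'X' ++ l ++ List.replicate (W + 10) 'X').drop m).take (W + 20) := by
  simp only [List.append_assoc, List.drop_append, List.take_append, List.drop_replicate,
    List.take_replicate, List.length_replicate, List.length_drop, List.take_length]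
  rw [Nat.sub_eq_zero_of_le h1, List.drop_zero,
    show min (W + 20) (10 - m) = 10 - m by omega,
    List.take_of_length_le (by omega),
    show min (W + 20 - (10 - m) - (l.length - 0)) (W + 10 - (0 - l.length)) = m + W + 10 - l.length by omega]

theorem pvCase2 (l : List Char) (m W : Nat) (hW : 1 ≤ W)
    (h1 : m ≤ 10) (h2 : m + W + 10 < l.length) :
    List.replicate (10 - m) 'X' ++ l.take (m + W + 10) =
      ((List.replicate 10 'X' ++ l ++ List.replicate (W + 10) 'X').drop m).take (W + 20) := by
  simp only [List.append_assoc, List.drop_append, List.take_append, List.drop_replicate,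
    List.take_replicate, List.length_replicate, List.length_drop]
  rw [Nat.sub_eq_zero_of_le h1, List.drop_zero,
    show min (W + 20) (10 - m) = 10 - m by omega,
    show W + 20 - (10 - m) = m + W + 10 by omega,
    show m + W + 10 - (l.length - 0) = 0 by omega]
  simp

theorem pvCase3 (l : List Char) (m W : Nat) (hW : 1 ≤ W) (hm : m < l.length)
    (h1 : 10 < m) (h2 : l.length ≤ m + W + 10) :
    (l.drop (m - 10)).take (l.length - (m - 10)) ++ List.replicate (m + W + 10 - l.length) 'X' =
      ((List.replicate 10 'X' ++ l ++ List.replicate (W + 10) 'X').drop m).take (W + 20) := by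
  simp only [List.append_assoc, List.drop_append, List.take_append, List.drop_replicate,
    List.take_replicate, List.length_replicate, List.length_drop]
  rw [show 10 - m = 0 by omega, List.take_of_length_le (by simp; try omega),
    List.take_of_length_le (by simp; try omega),
    show min (W + 20 - 0 - (l.length - (m - 10))) (W + 10 - (m - 10 - l.length)) = m + W + 10 - l.length by omega]
  simp

theorem pvCase4 (l : List Char) (m W : Nat) (hW : 1 ≤ W)
    (h1 : 10 < m) (h2 : m + W + 10 < l.length) :
    (l.drop (m - 10)).take (m + W + 10 - (m - 10)) =
      ((List.replicate 10 'X' ++ l ++ List.replicate (W + 10) 'X').drop m).take (W + 20) := by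
  simp only [List.append_assoc, List.drop_append, List.take_append, List.drop_replicate,
    List.take_replicate, List.length_replicate, List.length_drop]
  rw [show 10 - m = 0 by omega, show m + W + 10 - (m - 10) = W + 20 by omega,
    show W + 20 - 0 - (l.length - (m - 10)) = 0 by omega]
  simp

-- B's slice of the padded list, in drop/take form
theorem pvSliceB (l : List Char) (m W : Nat) :
    PySem.List.slice (List.replicate 10 'X' ++ l ++ List.replicate (W + 10) 'X')
        (some (m : Int)) (some ((m : Int) + (W : Int) + 20)) =
      ((List.replicate 10 'X' ++ l ++ List.replicate (W + 10) 'X').drop m).take (W + 20) := by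
  have h : (m : Int) + (W : Int) + 20 = ((m + (W + 20) : Nat) : Int) := by push_cast; ring
  rw [h, PySem.List.slice_natCast]
  congr 1
  omega

theorem pvExtA_eq_slice (l : List Char) (m W : Nat) (hW : 1 ≤ W) (hm : m < l.length) :
    pvExtA l (W : Int) (m : Int) =
      PySem.List.slice (List.replicate 10 'X' ++ l ++ List.replicate (W + 10) 'X')
        (some (m : Int)) (some ((m : Int) + (W : Int) + 20)) := by
  rw [pvSliceB]
  simp only [pvExtA]
  by_cases hs : m ≤ 10
  · have hstart : max 0 ((m : Int) - 10) = ((0 : Nat) : Int) := by push_cast; omega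
    by_cases he : l.length ≤ m + W + 10
    · have hend : min ((l.length : Int)) ((m : Int) + (W : Int) + 10) = ((l.length : Nat) : Int) := by
        omega
      rw [hstart, hend, PySem.List.slice_natCast]
      simp only [Nat.cast_zero, Nat.sub_zero, List.drop_zero, if_true]
      rw [show ((10 : Int) - (m : Int)).toNat = 10 - m by omega,
        show ((10 : Int) - ((l.length : Int) - (m : Int) - (W : Int))).toNat = m + W + 10 - l.length by omega]
      exact pvCase1 l m W hW hm hs he
    · have he' : m + W + 10 < l.length := by omega
      have hend : min ((l.length : Int)) ((m : Int) + (W : Int) + 10) = ((m + W + 10 : Nat) : Int) := by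
        push_cast; omega
      rw [hstart, hend, PySem.List.slice_natCast]
      simp only [Nat.cast_zero, Nat.sub_zero, List.drop_zero, if_true]
      rw [if_neg (by push_cast; omega),
        show ((10 : Int) - (m : Int)).toNat = 10 - m by omega]
      exact pvCase2 l m W hW hs he'
  · have hs' : 10 < m := by omega
    have hstart : max 0 ((m : Int) - 10) = ((m - 10 : Nat) : Int) := by omega
    have hstart_ne : ((m - 10 : Nat) : Int) ≠ 0 := by omega
    by_cases he : l.length ≤ m + W + 10
    · have hend : min ((l.length : Int)) ((m : Int) + (W : Int) + 10) = ((l.length : Nat) : Int) := by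
        omega
      rw [hstart, hend, PySem.List.slice_natCast]
      rw [if_neg hstart_ne, if_pos rfl,
        show ((10 : Int) - ((l.length : Int) - (m : Int) - (W : Int))).toNat = m + W + 10 - l.length by omega]
      exact pvCase3 l m W hW hm hs' he
    · have he' : m + W + 10 < l.length := by omega
      have hend : min ((l.length : Int)) ((m : Int) + (W : Int) + 10) = ((m + W + 10 : Nat) : Int) := by
        push_cast; omega
      rw [hstart, hend, PySem.List.slice_natCast]
      rw [if_neg hstart_ne, if_neg (by push_cast; omega)]
      exact pvCase4 l m W hW hs' he'

theorem pvRange_cons (a b s : Int) (hs : 0 < s) (h : a < b) :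
    PySem.List.pyRange a b s = a :: PySem.List.pyRange (a + s) b s := by
  rw [PySem.List.pyRange_of_pos a b hs, PySem.List.pyRange_of_pos (a + s) b hs, if_pos h]
  by_cases h2 : a + s < b
  · rw [if_pos h2]
    have e1 : (b - a + s - 1) / s = (b - (a + s) + s - 1) / s + 1 := by
      have e : b - a + s - 1 = (b - (a + s) + s - 1) + s := by ring
      rw [e]
      simpa using Int.add_mul_ediv_right (b - (a + s) + s - 1) 1 (by omega : s ≠ 0)
    have hn : 0 ≤ (b - (a + s) + s - 1) / s := Int.ediv_nonneg (by omega) (by omega)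
    rw [e1, show ((b - (a + s) + s - 1) / s + 1).toNat = ((b - (a + s) + s - 1) / s).toNat + 1 by omega,
      List.range_succ_eq_map, List.map_cons]
    simp only [Nat.cast_zero, mul_zero, add_zero, List.map_map]
    refine congrArg _ ?_
    exact List.map_congr_left (fun k _ => by simp [Function.comp]; ring)
  · rw [if_neg h2]
    have e1 : (b - a + s - 1) / s = 1 := by
      have h1 : 1 ≤ (b - a + s - 1) / s := by
        have := Int.ediv_le_ediv hs (show s ≤ b - a + s - 1 by omega)
        simpa [Int.ediv_self (by omega : s ≠ 0)] using this
      have h2' : (b - a + s - 1) / s < 2 := (Int.ediv_lt_iff_lt_mul hs).mpr (by omega)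
      omega
    rw [e1]
    simp

-- A's while loop is B's fold over range(0, len(s), window_size), window by window
theorem pvLoopA_eq_fold (l : List Char) (W : Nat) (hW : 1 ≤ W) :
    ∀ (fuel m : Nat) (acc : List String), l.length ≤ m + fuel * W →
      pvLoopA l (W : Int) fuel (m : Int) acc =
        (PySem.List.pyRange (m : Int) (l.length : Int) (W : Int)).foldl
          (fun windows i =>
            windows ++ [String.ofList (PySem.List.slice
              (List.replicate 10 'X' ++ l ++ List.replicate (W + 10) 'X')
              (some i) (some (i + (W : Int) + 20)))]) acc := by
  intro fuel
  induction fuel with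
  | zero =>
    intro m acc h
    rw [pvLoopA, PySem.List.pyRange_of_pos _ _ (by exact_mod_cast hW : (0 : Int) < (W : Int)),
      if_neg (by exact_mod_cast Nat.not_lt.mpr (by omega : l.length ≤ m))]
    simp
  | succ fuel ih =>
    intro m acc h
    by_cases hm : m < l.length
    · have hmi : (m : Int) < (l.length : Int) := by exact_mod_cast hm
      rw [pvLoopA]
      simp only [if_pos hmi]
      rw [pvExtA_eq_slice l m W hW hm,
        pvRange_cons _ _ _ (by exact_mod_cast hW) hmi, List.foldl_cons,
        show (m : Int) + (W : Int) = ((m + W : Nat) : Int) by push_cast; ring]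
      exact ih (m + W) _ (by (have e : m + (fuel + 1) * W = m + W + fuel * W := by ring); omega)
    · have hmi : ¬ (m : Int) < (l.length : Int) := by exact_mod_cast hm
      rw [pvLoopA, if_neg hmi,
        PySem.List.pyRange_of_pos _ _ (by exact_mod_cast hW : (0 : Int) < (W : Int)),
        if_neg hmi]
      simp

-- ===== VERDICT (by name: the statement is the Claim_ definition above) =====
theorem preprocess_sequence_spec : Claim_equal_preprocess_sequence := by
  intro sequence window_size _ hpre
  unfold Spec_preprocess_sequence preprocess_sequence preprocess_sequence_alt
  rcases hpre with h | h
  · subst h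
    simp [pvLoopA, PySem.Chars.upper]
  · obtain ⟨W, rfl⟩ : ∃ W : Nat, window_size = (W : Int) :=
      ⟨window_size.toNat, (Int.toNat_of_nonneg (by omega)).symm⟩
    have hW : 1 ≤ W := by exact_mod_cast h
    by_cases hnil : PySem.Chars.upper sequence.toList = []
    · simp [hnil, pvLoopA]
    · rw [if_neg hnil]
      have hpad : ((W : Int) + 10).toNat = W + 10 := by omega
      rw [hpad]
      have hfuel : (PySem.Chars.upper sequence.toList).length ≤ 0 +
          ((PySem.Chars.upper sequence.toList).length + 1) * W := by
        calc (PySem.Chars.upper sequence.toList).length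
            ≤ ((PySem.Chars.upper sequence.toList).length + 1) * 1 := by omega
          _ ≤ ((PySem.Chars.upper sequence.toList).length + 1) * W :=
              Nat.mul_le_mul_left _ hW
          _ = 0 + ((PySem.Chars.upper sequence.toList).length + 1) * W := by omega
      have := pvLoopA_eq_fold (PySem.Chars.upper sequence.toList) W hW
        ((PySem.Chars.upper sequence.toList).length + 1) 0 [] hfuel
      simpa using this
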